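-- pv_equiv track=rewrite | github.com/aoiwelle/DTDojo | src/kata3/cyclicwords_python/CyclicWords.py | getIndexOfOccurrence
-- ===== SOURCE A (Python) =====
-- def getIndexOfOccurrence(groups, valueToTest):
--     for y in range(len(groups)):
--         firstNode = groups[y][0]
--         if len(firstNode) != len(valueToTest):
--             continue
--         elif firstNode == valueToTest:
--             return y
--         else:
--             for x in range(len(valueToTest)-1):
--                 substr = valueToTest[:(len(valueToTest)-1-x)]
--                 indexOfSubStr = firstNode.rfind(substr)
--                 if indexOfSubStr>0:
--                     substr = valueToTest[(len(valueToTest)-1-x):]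
--                     firstNodeSub = firstNode[:indexOfSubStr]
--                     if substr == firstNodeSub:
--                         for z in groups[y][1:]:
--                             if z == valueToTest:
--                                 return y
--                         groups[y].append(valueToTest)
--                         return y
--     return -1
-- ===== SOURCE B (Python) =====
-- def getIndexOfOccurrence(groups, valueToTest):
--     for y, group in enumerate(groups):
--         first = group[0]
--         if first == valueToTest:
--             return y
--         if len(first) == len(valueToTest) and valueToTest in first + first:
--             if valueToTest not in group[1:]:
--                 group.append(valueToTest)
--             return y
--     return -1
-- ===== Notes on version B (the rewrite author's own statement) =====
-- stated objective: alternative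
-- what changed: A's inner loop that scans every prefix length of valueToTest with rfind plus a prefix/suffix comparison is replaced by the single substring test 'valueToTest in first+first' (a string is a rotation of another iff it occurs in the doubled string), after a plain equality check.
-- outside the precondition, e.g. on getIndexOfOccurrence([['ab'], []], 'ab'): A returns 0, B returns 0
import Mathlib
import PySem

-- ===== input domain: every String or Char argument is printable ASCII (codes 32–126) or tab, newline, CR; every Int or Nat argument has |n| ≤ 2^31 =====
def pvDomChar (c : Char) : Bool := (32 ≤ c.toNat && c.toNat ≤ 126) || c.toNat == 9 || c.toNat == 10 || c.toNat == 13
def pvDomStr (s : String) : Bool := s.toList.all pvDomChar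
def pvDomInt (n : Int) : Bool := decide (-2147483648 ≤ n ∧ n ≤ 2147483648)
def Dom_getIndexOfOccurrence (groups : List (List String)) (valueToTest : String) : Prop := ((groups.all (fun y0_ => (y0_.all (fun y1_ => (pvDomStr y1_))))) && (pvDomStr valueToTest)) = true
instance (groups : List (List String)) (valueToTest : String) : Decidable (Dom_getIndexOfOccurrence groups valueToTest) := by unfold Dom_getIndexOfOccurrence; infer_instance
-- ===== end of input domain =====

-- B replaces A's prefix-scan/rfind rotation test by the single substring-in-doubled-string test
-- 'valueToTest in first+first' (objective: alternative algorithm).  Both A and B append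
-- valueToTest to the matched group when it matched by rotation and is absent from its tail
-- (identical side effect); the equivalence proved here is about the RETURN value.

-- ===== PORT A =====
-- the 'for z in groups[y][1:]' loop: returns y on a match, else appends and returns y
def pvCheckTail : List String → String → Int → Int
  | [], _, y => y
  | z :: zs, v, y => if z = v then y else pvCheckTail zs v y

-- body of A's inner 'for x in range(len(valueToTest)-1)' loop: substr/rfind/prefix comparison
def pvHitA (f v : List Char) (x : Int) : Bool :=
  let m : Int := (v.length : Int) - 1 - x
  let substr := PySem.Chars.slice v none (some m)
  let indexOfSubStr := PySem.Chars.rfind f substr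
  decide (0 < indexOfSubStr) &&
    (PySem.Chars.slice v (some m) none == PySem.Chars.slice f none (some indexOfSubStr))

-- A's outer 'for y in range(len(groups))' loop, index y carried along
def pvGoA (v : String) : List (List String) → Int → Int
  | [], _ => -1
  | g :: rest, y =>
    match PySem.List.pyGet? g 0 with
    | none => -1   -- Python raises IndexError here (empty group); excluded by Pre_
    | some firstNode =>
      if firstNode.toList.length ≠ v.toList.length then pvGoA v rest (y + 1)
      else if firstNode = v then y
      else if (PySem.List.pyRange 0 ((v.toList.length : Int) - 1) 1).any (pvHitA firstNode.toList v.toList) then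
        pvCheckTail (PySem.List.slice g (some 1) none) v y
      else pvGoA v rest (y + 1)

def getIndexOfOccurrence (groups : List (List String)) (valueToTest : String) : Int :=
  pvGoA valueToTest groups 0

-- ===== PORT B =====
def pvGoB (v : String) : List (List String) → Int → Int
  | [], _ => -1
  | g :: rest, y =>
    match PySem.List.pyGet? g 0 with
    | none => -1   -- Source B raises IndexError here too (group[0]); excluded by Pre_
    | some first =>
      if first = v then y
      else if first.toList.length = v.toList.length ∧
              PySem.Chars.isIn v.toList (first.toList ++ first.toList) = true then
        -- Source B's 'if valueToTest not in group[1:]: group.append(...)' only mutates; the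
        -- return value is y on both branches
        (if v ∈ PySem.List.slice g (some 1) none then y else y)
      else pvGoB v rest (y + 1)

def getIndexOfOccurrence_alt (groups : List (List String)) (valueToTest : String) : Int :=
  pvGoB valueToTest groups 0

-- ===== PRECONDITION & SPEC =====
-- Pre_ excludes inputs containing an empty group: A (and B) raise IndexError on 'groups[y][0]'
-- when an empty group is reached; this also excludes inputs where a match occurs before the
-- empty group and A still returns (see the cite in claim.json).
def Pre_getIndexOfOccurrence (groups : List (List String)) (valueToTest : String) : Prop :=
  groups.all (fun g => !g.isEmpty) = true
instance (groups : List (List String)) (valueToTest : String) : Decidable (Pre_getIndexOfOccurrence groups valueToTest) := by unfold Pre_getIndexOfOccurrence; infer_instance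

def pvWitness_getIndexOfOccurrence : List (List String) × String := ([["ab", "x"], ["bca"]], "abc")

def Spec_getIndexOfOccurrence (groups : List (List String)) (valueToTest : String) (out : Int) : Prop := out = getIndexOfOccurrence_alt groups valueToTest
instance (groups : List (List String)) (valueToTest : String) (out : Int) : Decidable (Spec_getIndexOfOccurrence groups valueToTest out) := by unfold Spec_getIndexOfOccurrence; infer_instance

-- ===== CLAIM (what is proved, stated in full; the proofs are below) =====
def Claim_equal_getIndexOfOccurrence : Prop := ∀ (groups : List (List String)) (valueToTest : String), Dom_getIndexOfOccurrence groups valueToTest → Pre_getIndexOfOccurrence groups valueToTest → Spec_getIndexOfOccurrence groups valueToTest (getIndexOfOccurrence groups valueToTest)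

-- ===== LEMMAS AND PROOFS =====

-- f is a nontrivial rotation of v
def pvRot (f v : List Char) : Prop :=
  ∃ k : Nat, 1 ≤ k ∧ k < v.length ∧ f = v.drop k ++ v.take k

theorem pvCheckTail_eq (l : List String) (v : String) (y : Int) : pvCheckTail l v y = y := by
  induction l with
  | nil => rfl
  | cons z zs ih => simp [pvCheckTail, ih]

theorem rfind_go_zero (s sub : List Char) :
    PySem.Chars.rfind.go s sub 0 = if sub.isPrefixOf s then 0 else -1 := rfl

theorem rfind_go_succ (s sub : List Char) (j : Nat) :
    PySem.Chars.rfind.go s sub (j+1) =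
      if sub.isPrefixOf (s.drop (j+1)) then ((j : Int) + 1) else PySem.Chars.rfind.go s sub j := by
  simp [PySem.Chars.rfind.go]

theorem rfind_go_eq_of_max (s sub : List Char) (m : Nat) :
    ∀ j : Nat, m ≤ j → sub <+: s.drop m →
      (∀ i : Nat, m < i → i ≤ j → ¬ sub <+: s.drop i) →
      PySem.Chars.rfind.go s sub j = (m : Int) := by
  intro j
  induction j with
  | zero =>
    intro hm hp _
    interval_cases m
    rw [rfind_go_zero, if_pos (by simpa [List.isPrefixOf_iff_prefix] using hp)]
    simp
  | succ j ih =>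
    intro hm hp hmax
    rw [rfind_go_succ]
    by_cases hjm : m = j + 1
    · subst hjm
      simp [List.isPrefixOf_iff_prefix, hp]
    · have hmj : m ≤ j := by omega
      have : ¬ sub <+: s.drop (j+1) := hmax (j+1) (by omega) (le_refl _)
      simp only [List.isPrefixOf_iff_prefix]
      rw [if_neg this]
      exact ih hmj hp (fun i h1 h2 => hmax i h1 (by omega))

theorem rfind_go_result (s sub : List Char) :
    ∀ j : Nat, PySem.Chars.rfind.go s sub j ≠ -1 →
      ∃ m : Nat, m ≤ j ∧ PySem.Chars.rfind.go s sub j = (m : Int) ∧ sub <+: s.drop m := by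
  intro j
  induction j with
  | zero =>
    intro h
    rw [rfind_go_zero] at h ⊢
    by_cases hp : sub.isPrefixOf s
    · exact ⟨0, le_refl _, by simp [hp], by simpa [List.isPrefixOf_iff_prefix] using hp⟩
    · simp [hp] at h
  | succ j ih =>
    intro h
    rw [rfind_go_succ] at h ⊢
    by_cases hp : sub.isPrefixOf (s.drop (j+1))
    · exact ⟨j+1, le_refl _, by simp [hp], by simpa [List.isPrefixOf_iff_prefix] using hp⟩
    · rw [if_neg (by simpa using hp)] at h ⊢
      obtain ⟨m, hm, he, hpre⟩ := ih h
      exact ⟨m, by omega, he, hpre⟩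

-- rfind applied to a true rotation returns exactly n - k
theorem rfind_of_rot (f v : List Char) (h : f.length = v.length) (k : Nat)
    (hk1 : 1 ≤ k) (hk2 : k < v.length) (hr : f = v.drop k ++ v.take k) :
    PySem.Chars.rfind f (v.take k) = ((v.length - k : Nat) : Int) := by
  have hn : f.length = v.length := h
  have hdk : (v.drop k).length = v.length - k := by simp
  have htk : (v.take k).length = k := by simp; omega
  unfold PySem.Chars.rfind
  apply rfind_go_eq_of_max
  · omega
  · have : f.drop (v.drop k).length = v.take k := by rw [hr, List.drop_left]
    rw [hdk] at this
    rw [this]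
  · intro i h1 h2
    intro hpre
    have := hpre.length_le
    have : (f.drop i).length = f.length - i := by simp
    omega

-- one successful iteration of A's inner loop yields a nontrivial rotation
theorem hit_to_rot (f v : List Char) (h : f.length = v.length) (x : Int)
    (hx0 : 0 ≤ x) (hx1 : x < (v.length : Int) - 1) (hhit : pvHitA f v x = true) :
    pvRot f v := by
  unfold pvHitA at hhit
  simp only [Bool.and_eq_true, decide_eq_true_eq, beq_iff_eq] at hhit
  obtain ⟨hpos, heq⟩ := hhit
  set m : Int := (v.length : Int) - 1 - x with hm
  have hm0 : 0 ≤ m := by omega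
  have hm1 : 1 ≤ m := by omega
  have hmn : m ≤ (v.length : Int) - 1 := by omega
  set k : Nat := m.toNat with hkdef
  have hk1 : 1 ≤ k := by omega
  have hk2 : k < v.length := by omega
  simp only [PySem.Chars.slice_eq_listSlice] at heq hpos
  rw [PySem.List.slice_to v hm0] at heq hpos
  rw [PySem.List.slice_from v hm0] at heq
  have hi0' : (0:Int) ≤ PySem.Chars.rfind f (List.take m.toNat v) := le_of_lt hpos
  rw [PySem.List.slice_to f hi0'] at heq
  -- hpos : 0 < rfind f (v.take k), heq : v.drop k = f.take (rfind f (v.take k)).toNat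
  set i : Int := PySem.Chars.rfind f (List.take m.toNat v) with hi
  have hne : PySem.Chars.rfind.go f (List.take m.toNat v) f.length ≠ -1 := by
    unfold PySem.Chars.rfind at hi; omega
  obtain ⟨m', hm', he, hpre⟩ := rfind_go_result f (List.take m.toNat v) f.length hne
  have him : i = (m' : Int) := by unfold PySem.Chars.rfind at hi; rw [hi, he]
  -- lengths force m' = v.length - k
  have hlen1 : (v.drop k).length = v.length - k := by simp
  have hlen2 : (f.take i.toNat).length = min i.toNat f.length := by simp
  have hitoNat : i.toNat = m' := by omega
  have hmm : m' = v.length - k := by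
    have := congrArg List.length heq
    rw [hlen1, hlen2] at this
    omega
  -- the prefix occurrence, same length ⇒ equality
  have hdroplen : (f.drop m').length = f.length - m' := by simp
  have htklen : (List.take k v).length = k := by simp; omega
  have hpre' : List.take k v <+: f.drop m' := hpre
  have heq2 : List.take k v = f.drop m' := by
    have hle : (List.take k v).length = (f.drop m').length := by omega
    exact List.IsPrefix.eq_of_length hpre' hle
  refine ⟨k, hk1, hk2, ?_⟩
  -- f = f.take m' ++ f.drop m' = v.drop k ++ v.take k
  have : f = f.take i.toNat ++ f.drop m' := by rw [hitoNat]; simp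
  rw [this, ← heq, ← heq2]

-- a nontrivial rotation makes A's inner loop hit
theorem rot_to_hit (f v : List Char) (h : f.length = v.length) (hr : pvRot f v) :
    ∃ x ∈ PySem.List.pyRange 0 ((v.length : Int) - 1) 1, pvHitA f v x = true := by
  obtain ⟨k, hk1, hk2, hfk⟩ := hr
  refine ⟨(v.length : Int) - 1 - k, ?_, ?_⟩
  · rw [PySem.List.mem_pyRange_one]; omega
  · unfold pvHitA
    have hm : (v.length : Int) - 1 - ((v.length : Int) - 1 - (k : Int)) = (k : Int) := by ring
    have hk0 : (0 : Int) ≤ (k : Int) := by omega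
    simp only [hm, PySem.Chars.slice_eq_listSlice, PySem.List.slice_to v hk0,
               PySem.List.slice_from v hk0, Int.toNat_natCast,
               rfind_of_rot f v h k hk1 hk2 hfk]
    have h1 : (0 : Int) < ((v.length - k : Nat) : Int) := by omega
    have h2 : f.take (v.length - k) = v.drop k := by
      have hdk : (v.drop k).length = v.length - k := by simp
      rw [hfk, ← hdk, List.take_left]
    rw [PySem.List.slice_to f (le_of_lt h1)]
    simp [h1, h2, Int.toNat_natCast]
    omega

-- A's inner loop hits iff f is a nontrivial rotation of v
theorem anyA_iff_rot (f v : List Char) (h : f.length = v.length) :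
    ((PySem.List.pyRange 0 ((v.length : Int) - 1) 1).any (pvHitA f v) = true) ↔ pvRot f v := by
  rw [List.any_eq_true]
  constructor
  · rintro ⟨x, hx, hhit⟩
    rw [PySem.List.mem_pyRange_one] at hx
    exact hit_to_rot f v h x hx.1 hx.2 hhit
  · intro hr
    exact rot_to_hit f v h hr

-- B's doubled-string test equals nontrivial rotation (for equal-length, distinct strings)
theorem isIn_doubled_iff_rot (f v : List Char) (h : f.length = v.length) (hne : f ≠ v) :
    (PySem.Chars.isIn v (f ++ f) = true) ↔ pvRot f v := by
  rw [PySem.Chars.isIn_iff_infix]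
  constructor
  · rintro ⟨s, t, hst⟩
    set j : Nat := s.length with hj
    have hlen : 2 * f.length = j + v.length + t.length := by
      have := congrArg List.length hst
      simp at this; omega
    have hjn : j ≤ f.length := by omega
    -- v = f.drop j ++ f.take j
    have hsplit : f = f.take j ++ f.drop j := by simp
    have hdropped : (f ++ f).drop j = f.drop j ++ f := by
      conv_lhs => rw [hsplit]
      rw [List.append_assoc, List.drop_left' (by simp; omega)]
      rw [List.take_append_drop]
    have hvt : v ++ t = (f ++ f).drop j := by
      rw [← hst, hj, List.append_assoc, List.drop_left]
    have hv : v = f.drop j ++ f.take j := by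
      have h1 : (v ++ t).take v.length = v := by rw [List.take_left]
      rw [hvt, hdropped] at h1
      rw [← h1, List.take_append]
      congr 1
      · exact List.take_of_length_le (by simp; omega)
      · congr 1
        simp
        omega
    have hj0 : j ≠ 0 := by
      intro h0; apply hne
      rw [hv, h0]; simp
    have hjn' : j ≠ f.length := by
      intro h0; apply hne
      rw [hv, h0]; simp
    refine ⟨f.length - j, by omega, by omega, ?_⟩
    have hdlen : (f.drop j).length = f.length - j := by simp
    have hvd : v.drop (f.length - j) = f.take j := by
      rw [hv, ← hdlen, List.drop_left]
    have hvt' : v.take (f.length - j) = f.drop j := by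
      rw [hv, ← hdlen, List.take_left]
    rw [hvd, hvt']; simp
  · rintro ⟨k, hk1, hk2, hfk⟩
    refine ⟨v.drop k, v.take k, ?_⟩
    have hv : List.take k v ++ List.drop k v = v := List.take_append_drop k v
    rw [hfk]
    calc List.drop k v ++ v ++ List.take k v
        = List.drop k v ++ (List.take k v ++ List.drop k v) ++ List.take k v := by rw [hv]
      _ = (List.drop k v ++ List.take k v) ++ (List.drop k v ++ List.take k v) := by
          simp only [List.append_assoc]

theorem pvGoAB (v : String) (groups : List (List String)) (y : Int) :
    pvGoA v groups y = pvGoB v groups y := by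
  induction groups generalizing y with
  | nil => rfl
  | cons g rest ih =>
    rw [pvGoA, pvGoB]
    cases hg : PySem.List.pyGet? g 0 with
    | none => rfl
    | some fn =>
      dsimp only
      by_cases hlen : fn.toList.length = v.toList.length
      · by_cases heq : fn = v
        · rw [if_neg (fun hc => hc hlen), if_pos heq, if_pos heq]
        · have hnel : fn.toList ≠ v.toList := fun hl => heq (String.toList_inj.mp hl)
          have hkey : ((PySem.List.pyRange 0 ((v.toList.length : Int) - 1) 1).any (pvHitA fn.toList v.toList) = true)
              ↔ (PySem.Chars.isIn v.toList (fn.toList ++ fn.toList) = true) := by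
            rw [anyA_iff_rot fn.toList v.toList hlen, isIn_doubled_iff_rot fn.toList v.toList hlen hnel]
          by_cases hhit : (PySem.List.pyRange 0 ((v.toList.length : Int) - 1) 1).any (pvHitA fn.toList v.toList) = true
          · have hisin : PySem.Chars.isIn v.toList (fn.toList ++ fn.toList) = true := hkey.mp hhit
            rw [if_neg (fun hc => hc hlen), if_neg heq, if_pos hhit,
                if_neg heq, if_pos ⟨hlen, hisin⟩, pvCheckTail_eq]
            split <;> rfl
          · have hisin : ¬ PySem.Chars.isIn v.toList (fn.toList ++ fn.toList) = true :=
              fun hx => hhit (hkey.mpr hx)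
            rw [if_neg (fun hc => hc hlen), if_neg heq, if_neg hhit,
                if_neg heq, if_neg (fun hc => hisin hc.2)]
            exact ih (y + 1)
      · have heq : fn ≠ v := fun h => hlen (by rw [h])
        rw [if_pos hlen, if_neg heq, if_neg (fun hc => hlen hc.1)]
        exact ih (y + 1)

-- ===== VERDICT (by name: the statement is the Claim_ definition above) =====
theorem getIndexOfOccurrence_spec : Claim_equal_getIndexOfOccurrence := by
  intro groups v _ _
  unfold Spec_getIndexOfOccurrence getIndexOfOccurrence getIndexOfOccurrence_alt
  exact pvGoAB v groups 0
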